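-- pv_equiv track=rewrite | github.com/Cxy990605/Data-Mining-Spark | Frequent Item Sets/SON Algorithm.py | output
-- ===== SOURCE A (Python) =====
-- from collections import defaultdict
--
-- def output(medium_input):
--     st, end = len(medium_input[0]), len(medium_input[-1])
--     cache = defaultdict(list)
--     for i in range(st,end+1):
--         if i == 1:
--             for j in medium_input:
--                 if len(j) == 1:
--                     singles = "(" + "'" + j[0] + "'" + ")"
--                     cache[i].append(singles)
--         else:
--             for j in medium_input:
--                 if len(j) == i:
--                     cache[i].append(str(j))
--     for k in cache:
--         tmp_lst = sorted(cache[k])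
--         new_lst = ",".join(tmp_lst)
--         cache[k] = new_lst
--     keys = sorted(list(cache.keys()))
--     lst = []
--     for item in keys:
--         lst.append(cache[item])
--     output_str = "\n\n".join(lst)
--     return output_str
-- ===== SOURCE B (Python) =====
-- def output(medium_input):
--     st, end = len(medium_input[0]), len(medium_input[-1])
--     pairs = [(len(j), "('" + j[0] + "')" if len(j) == 1 else str(j))
--              for j in medium_input if st <= len(j) <= end]
--     groups = {}
--     for length, text in pairs:
--         groups.setdefault(length, []).append(text)
--     return "\n\n".join(",".join(sorted(groups[k])) for k in sorted(groups))
-- ===== Notes on version B (the rewrite author's own statement) =====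
-- stated objective: simpler
-- what changed: A rescans the whole list once per length in range(st,end+1) and keeps a defaultdict it rewrites in a second pass; B makes one pass building (length, text) pairs filtered to [st,end], groups them in a single dict, and emits sorted groups directly.
import Mathlib
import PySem

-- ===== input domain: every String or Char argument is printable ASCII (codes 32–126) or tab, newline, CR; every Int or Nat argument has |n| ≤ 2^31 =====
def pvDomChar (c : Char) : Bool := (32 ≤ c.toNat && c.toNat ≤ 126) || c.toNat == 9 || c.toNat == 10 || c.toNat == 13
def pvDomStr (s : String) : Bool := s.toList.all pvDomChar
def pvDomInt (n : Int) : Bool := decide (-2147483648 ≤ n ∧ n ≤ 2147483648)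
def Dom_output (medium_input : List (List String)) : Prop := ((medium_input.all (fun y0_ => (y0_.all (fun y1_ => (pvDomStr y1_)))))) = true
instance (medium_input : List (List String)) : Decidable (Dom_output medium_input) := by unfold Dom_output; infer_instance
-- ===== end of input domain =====

-- B replaces A's per-length rescans of the whole list by one pass building (length, text) pairs
-- and a single grouping dict, then emits sorted groups directly (objective: simpler).
-- Both Pythons raise IndexError on [] (input[0]); that input is excluded by Pre_output.

-- ===== PORT A =====
-- Shared rendering helpers (both Pythons build the same string fragments).
-- Python repr escape of one character inside quote q; exact on the Dom alphabet
-- (printable ASCII plus tab/newline/CR — the only chars needing escapes there are \ ' " \t \n \r).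
def pyReprEsc (q : Char) (c : Char) : List Char :=
  if c = '\\' then ['\\', '\\']
  else if c = q then ['\\', q]
  else if c = '\t' then ['\\', 't']
  else if c = '\n' then ['\\', 'n']
  else if c = '\r' then ['\\', 'r']
  else [c]

-- Python repr(s) for a str: single quotes unless s has ' and no "; exact on the Dom alphabet
def pyReprStr (s : String) : String :=
  let cs := s.toList
  let q : Char := if cs.contains '\'' && !(cs.contains '"') then '"' else '\''
  String.ofList (q :: cs.flatMap (pyReprEsc q) ++ [q])

-- Python str(j) for a tuple of str: "('a', 'b')", "()", "('a',)"; exact on the Dom alphabet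
def pyReprListStr (js : List String) : String :=
  String.ofList ('(' :: PySem.Chars.join ", ".toList (js.map (fun s => (pyReprStr s).toList))
    ++ (if js.length == 1 then [',', ')'] else [')']))

-- A's singles = "(" + "'" + j[0] + "'" + ")" (built over List Char: Lean's String.append is kernel-opaque)
def pySingles (j : List String) : String :=
  String.ofList ("('".toList ++ (j.headD "").toList ++ "')".toList)

def output (medium_input : List (List String)) : String :=
  -- medium_input[0] / medium_input[-1]; IndexError on [] is excluded by Pre_output
  let st : Int := (medium_input.headD []).length
  let en : Int := (medium_input.getLastD []).length
  -- cache = defaultdict(list); for i in range(st, end+1): …  (cache[i].append x = modify i [] (· ++ [x]))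
  let cache : PySem.Dict Int (List String) :=
    (PySem.List.pyRange st (en + 1) 1).foldl (fun d i =>
      if i == 1 then
        medium_input.foldl (fun d j =>
          if j.length == 1 then d.modify i [] (· ++ [pySingles j]) else d) d
      else
        medium_input.foldl (fun d j =>
          if (j.length : Int) == i then d.modify i [] (· ++ [pyReprListStr j]) else d) d)
      PySem.Dict.empty
  -- for k in cache: cache[k] = ",".join(sorted(cache[k])) — Python rebinds each value to a str;
  -- Lean's typing forces a fresh dict; each key is visited once, so every read is of the untouched value
  let cache2 : PySem.Dict Int String :=
    cache.items.foldl (fun d p =>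
      d.insert p.1 (PySem.Str.join "," (PySem.List.sorted p.2 (fun x => x)))) PySem.Dict.empty
  -- keys = sorted(list(cache.keys())) — cache2 has exactly cache's keys in the same order
  let keys := PySem.List.sorted cache2.keys (fun x => x)
  -- for item in keys: lst.append(cache[item]) — key present, so getD's default is never used
  let lst := keys.foldl (fun l k => l ++ [cache2.getD k ""]) []
  PySem.Str.join "\n\n" lst

-- ===== PORT B =====
def output_alt (medium_input : List (List String)) : String :=
  let st : Int := (medium_input.headD []).length
  let en : Int := (medium_input.getLastD []).length
  -- pairs = [(len(j), text) for j in medium_input if st <= len(j) <= end]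
  let pairs : List (Int × String) :=
    (medium_input.filter (fun j => st ≤ (j.length : Int) && (j.length : Int) ≤ en)).map
      (fun j => ((j.length : Int),
        if j.length == 1 then pySingles j else pyReprListStr j))
  -- groups.setdefault(length, []).append(text)  =  modify length [] (· ++ [text])
  let groups : PySem.Dict Int (List String) :=
    pairs.foldl (fun d p => d.modify p.1 [] (· ++ [p.2])) PySem.Dict.empty
  PySem.Str.join "\n\n"
    ((PySem.List.sorted groups.keys (fun x => x)).map
      (fun k => PySem.Str.join "," (PySem.List.sorted (groups.getD k []) (fun x => x))))

-- ===== PRECONDITION & SPEC =====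
-- Pre_ excludes only the empty list, on which A (and B) raise IndexError at medium_input[0].
def Pre_output (medium_input : List (List String)) : Prop := medium_input ≠ []
instance (medium_input : List (List String)) : Decidable (Pre_output medium_input) := by
  unfold Pre_output; infer_instance
def pvWitness_output : List (List String) := [["a"], ["b", "c"]]
def Spec_output (medium_input : List (List String)) (out : String) : Prop := out = output_alt medium_input
instance (medium_input : List (List String)) (out : String) : Decidable (Spec_output medium_input out) := by
  unfold Spec_output; infer_instance

-- ===== CLAIM (what is proved, stated in full; the proofs are below) =====
def Claim_equal_output : Prop := ∀ (medium_input : List (List String)), Dom_output medium_input → Pre_output medium_input → Spec_output medium_input (output medium_input)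

-- ===== LEMMAS AND PROOFS =====

-- the text both programs attach to a tuple j
def pvFmt (j : List String) : String :=
  if j.length == 1 then pySingles j else pyReprListStr j

-- the group of length i, in input order
def pvG (mi : List (List String)) (i : Int) : List String :=
  (mi.filter (fun j => (j.length : Int) == i)).map pvFmt

-- A's inner loop over medium_input for one i, unified via pvFmt
def pvInner (mi : List (List String)) (i : Int) (d : PySem.Dict Int (List String)) :
    PySem.Dict Int (List String) :=
  mi.foldl (fun d j => if (j.length : Int) == i then d.modify i [] (· ++ [pvFmt j]) else d) d

theorem pvInner_eq_pairs (mi : List (List String)) (i : Int) (d : PySem.Dict Int (List String)) :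
    pvInner mi i d =
      ((mi.filter (fun j => (j.length : Int) == i)).map (fun j => (i, pvFmt j))).foldl
        (fun d p => d.modify p.1 [] (· ++ [p.2])) d := by
  rw [List.foldl_map, List.foldl_filter]
  rfl

theorem pvInner_getD (mi : List (List String)) (i : Int) (d : PySem.Dict Int (List String)) (k : Int) :
    (pvInner mi i d).getD k [] = if k = i then d.getD i [] ++ pvG mi i else d.getD k [] := by
  rw [pvInner_eq_pairs, PySem.Dict.getD_foldl_modify_append, List.filter_map]
  by_cases h : k = i
  · subst h
    simp [pvG, Function.comp_def]
  · have : (fun j => ((i, pvFmt j).1 == k)) ∘ id = fun _ => false := by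
      funext j; simp [Ne.symm h]
    simp [Function.comp_def, Ne.symm h, h]

theorem pvInner_mem_keys (mi : List (List String)) (i : Int) (d : PySem.Dict Int (List String)) (k : Int) :
    k ∈ (pvInner mi i d).keys ↔ k ∈ d.keys ∨ (k = i ∧ pvG mi i ≠ []) := by
  rw [pvInner_eq_pairs, PySem.Dict.keys_foldl_modify_key, PySem.Set.mem_update]
  simp only [List.map_map, List.mem_map]
  constructor
  · rintro (h | ⟨j, hj, rfl⟩)
    · exact Or.inl h
    · refine Or.inr ⟨rfl, ?_⟩
      simp only [pvG, ne_eq, List.map_eq_nil_iff]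
      intro hnil
      rw [hnil] at hj
      exact (List.not_mem_nil hj).elim
  · rintro (h | ⟨rfl, hne⟩)
    · exact Or.inl h
    · right
      simp only [pvG, ne_eq, List.map_eq_nil_iff] at hne
      obtain ⟨j, hj⟩ := List.exists_mem_of_ne_nil _ hne
      exact ⟨j, hj, rfl⟩

theorem pvInner_nodup_keys (mi : List (List String)) (i : Int) (d : PySem.Dict Int (List String))
    (h : d.keys.Nodup) : (pvInner mi i d).keys.Nodup := by
  rw [pvInner_eq_pairs]
  exact PySem.Dict.nodup_keys_foldl_modify_key _ _ _ _ _ h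

-- outer loop characterisation
theorem pvOuter_getD (mi : List (List String)) (R : List Int) (hR : R.Nodup)
    (d : PySem.Dict Int (List String)) (k : Int) :
    (R.foldl (fun d i => pvInner mi i d) d).getD k [] =
      if k ∈ R then d.getD k [] ++ pvG mi k else d.getD k [] := by
  induction R generalizing d with
  | nil => simp
  | cons i R' ih =>
    simp only [List.nodup_cons] at hR
    rw [List.foldl_cons, ih hR.2]
    by_cases hk : k ∈ R'
    · have hki : k ≠ i := fun h => hR.1 (h ▸ hk)
      simp [hk, hki, pvInner_getD, List.mem_cons]
    · by_cases hki : k = i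
      · subst hki
        simp [hk, pvInner_getD]
      · simp [hk, hki, pvInner_getD, List.mem_cons]

theorem pvOuter_mem_keys (mi : List (List String)) (R : List Int)
    (d : PySem.Dict Int (List String)) (k : Int) :
    k ∈ (R.foldl (fun d i => pvInner mi i d) d).keys ↔
      k ∈ d.keys ∨ (k ∈ R ∧ pvG mi k ≠ []) := by
  induction R generalizing d with
  | nil => simp
  | cons i R' ih =>
    rw [List.foldl_cons, ih, pvInner_mem_keys]
    constructor
    · rintro ((h | ⟨rfl, hne⟩) | ⟨hR, hne⟩)
      · exact Or.inl h
      · exact Or.inr ⟨List.mem_cons_self, hne⟩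
      · exact Or.inr ⟨List.mem_cons_of_mem _ hR, hne⟩
    · rintro (h | ⟨hmem, hne⟩)
      · exact Or.inl (Or.inl h)
      · rcases List.mem_cons.mp hmem with rfl | hR'
        · exact Or.inl (Or.inr ⟨rfl, hne⟩)
        · exact Or.inr ⟨hR', hne⟩

theorem pvOuter_nodup_keys (mi : List (List String)) (R : List Int)
    (d : PySem.Dict Int (List String)) (h : d.keys.Nodup) :
    (R.foldl (fun d i => pvInner mi i d) d).keys.Nodup := by
  induction R generalizing d with
  | nil => exact h
  | cons i R' ih => exact ih _ (pvInner_nodup_keys mi i d h)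

theorem pv_foldl_append (f : Int → String) (keys : List Int) (l : List String) :
    keys.foldl (fun l k => l ++ [f k]) l = l ++ keys.map f := by
  rw [PySem.List.foldl_append_eq_flatMap (fun k => [f k])]
  congr 1
  induction keys with
  | nil => rfl
  | cons a t ih => simp [List.flatMap_cons, ih]

-- A's two branches are pvInner
theorem pvStepA (mi : List (List String)) (i : Int) (d : PySem.Dict Int (List String)) :
    (if i == 1 then
        mi.foldl (fun d j => if j.length == 1 then d.modify i [] (· ++ [pySingles j]) else d) d
      else
        mi.foldl (fun d j => if (j.length : Int) == i then d.modify i [] (· ++ [pyReprListStr j]) else d) d)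
      = pvInner mi i d := by
  unfold pvInner
  by_cases hi : i = 1
  · subst hi
    simp only [beq_self_eq_true, if_true]
    refine List.foldl_ext _ _ _ (fun d j _ => ?_)
    by_cases hj : j.length = 1
    · simp [hj, pvFmt]
    · have : ¬ ((j.length : Int) = 1) := by exact_mod_cast hj
      simp [hj, this]
  · simp only [beq_iff_eq, hi, if_false]
    refine List.foldl_ext _ _ _ (fun d j _ => ?_)
    by_cases hj : (j.length : Int) = i
    · have hj1 : j.length ≠ 1 := by
        intro h; apply hi; rw [← hj, h]; rfl
      simp [hj, pvFmt, hj1]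
    · simp [hj]

theorem pvPairB :
    (fun (j : List String) => ((j.length : Int), if j.length == 1 then pySingles j else pyReprListStr j))
      = (fun (j : List String) => ((j.length : Int), pvFmt j)) := rfl

theorem pv_main (mi : List (List String)) : output mi = output_alt mi := by
  unfold output output_alt
  simp only [pvStepA]
  rw [pvPairB]
  set st : Int := ((mi.headD []).length : Int) with hst
  set en : Int := ((mi.getLastD []).length : Int) with hen
  set R := PySem.List.pyRange st (en + 1) 1 with hR
  set cache := R.foldl (fun d i => pvInner mi i d) PySem.Dict.empty with hcache
  set pairs := ((mi.filter (fun j => st ≤ (j.length : Int) && (j.length : Int) ≤ en)).map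
      (fun j => ((j.length : Int), pvFmt j))) with hpairs
  set groups := pairs.foldl (fun d p => d.modify p.1 [] (· ++ [p.2])) PySem.Dict.empty with hgroups
  set cache2 := cache.items.foldl
      (fun d p => d.insert p.1 (PySem.Str.join "," (PySem.List.sorted p.2 (fun x => x))))
      PySem.Dict.empty with hcache2
  have hnodR : R.Nodup := PySem.List.nodup_pyRange_one st (en + 1)
  have hnodC : cache.keys.Nodup :=
    pvOuter_nodup_keys mi R PySem.Dict.empty PySem.Dict.nodup_keys_empty
  have hCget : ∀ k ∈ R, cache.getD k [] = pvG mi k := by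
    intro k hk
    rw [hcache, pvOuter_getD mi R hnodR PySem.Dict.empty k]
    simp [hk]
  have hCmem : ∀ k, k ∈ cache.keys ↔ k ∈ R ∧ pvG mi k ≠ [] := by
    intro k
    rw [hcache, pvOuter_mem_keys]
    simp
  have hitems2 : cache2.items = cache.items.map
      (fun a => (a.1, PySem.Str.join "," (PySem.List.sorted a.2 (fun x => x)))) := by
    rw [hcache2]
    rw [PySem.Dict.items_foldl_insert_fresh cache.items (fun p => p.1)
      (fun p => PySem.Str.join "," (PySem.List.sorted p.2 (fun x => x))) PySem.Dict.empty
      (fun a _ => rfl) hnodC]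
    rfl
  have hkeys2 : cache2.keys = cache.keys := by
    show cache2.items.map (fun p => p.1) = cache.items.map (fun p => p.1)
    rw [hitems2, List.map_map]
    rfl
  have hget2 : ∀ k ∈ cache.keys, cache2.getD k "" =
      PySem.Str.join "," (PySem.List.sorted (pvG mi k) (fun x => x)) := by
    intro k hk
    have hkR : k ∈ R := ((hCmem k).mp hk).1
    have hmem : (k, cache.getD k []) ∈ cache.items := by
      rw [PySem.Dict.items_eq_map_keys cache hnodC []]
      exact List.mem_map.mpr ⟨k, hk, rfl⟩
    have hmem2 : (k, PySem.Str.join "," (PySem.List.sorted (pvG mi k) (fun x => x))) ∈ cache2.items := by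
      rw [hitems2]
      refine List.mem_map.mpr ⟨(k, cache.getD k []), hmem, ?_⟩
      simp [hCget k hkR]
    exact PySem.Dict.getD_of_mem_items cache2 hmem2 (hkeys2 ▸ hnodC) ""
  have hBget : ∀ k ∈ R, groups.getD k [] = pvG mi k := by
    intro k hk
    have hken : k ≤ en := by
      have := (PySem.List.mem_pyRange_one.mp hk).2
      omega
    have hkst : st ≤ k := (PySem.List.mem_pyRange_one.mp hk).1
    rw [hgroups, PySem.Dict.getD_foldl_modify_append, PySem.Dict.getD_empty, List.nil_append,
      hpairs, List.filter_map, List.filter_filter]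
    rw [List.map_map]
    show List.map (fun j => pvFmt j) _ = _
    rw [List.filter_congr (q := fun j => (j.length : Int) == k) ?_]
    · rfl
    · intro j _
      by_cases hq : (j.length : Int) = k
      · simp [hq, hkst, hken]
      · simp [hq]
  have hBkeys : groups.keys = PySem.Set.ofList (pairs.map (fun p => p.1)) := by
    rw [hgroups, PySem.Dict.keys_foldl_modify_key pairs (fun p => p.1) []
      (fun d p => (· ++ [p.2])) PySem.Dict.empty]
    exact PySem.Set.update_empty _
  have hBmem : ∀ k, k ∈ groups.keys ↔ k ∈ R ∧ pvG mi k ≠ [] := by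
    intro k
    rw [hBkeys, PySem.Set.mem_ofList]
    constructor
    · intro hkmem
      obtain ⟨p, hp, rfl⟩ := List.mem_map.mp hkmem
      obtain ⟨j, hj, rfl⟩ := List.mem_map.mp hp
      obtain ⟨hjm, hcond⟩ := List.mem_filter.mp hj
      simp only [Bool.and_eq_true, decide_eq_true_eq] at hcond
      refine ⟨PySem.List.mem_pyRange_one.mpr ⟨hcond.1, by omega⟩, ?_⟩
      have hjf : j ∈ mi.filter (fun j' => (j'.length : Int) == (j.length : Int)) :=
        List.mem_filter.mpr ⟨hjm, by simp⟩
      simp only [pvG, ne_eq, List.map_eq_nil_iff]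
      intro hnil
      rw [hnil] at hjf
      exact List.not_mem_nil hjf
    · rintro ⟨hkR, hne⟩
      obtain ⟨hkst, hklt⟩ := PySem.List.mem_pyRange_one.mp hkR
      simp only [pvG, ne_eq, List.map_eq_nil_iff] at hne
      obtain ⟨j, hj⟩ := List.exists_mem_of_ne_nil _ hne
      obtain ⟨hjm, hcond⟩ := List.mem_filter.mp hj
      have hlen : (j.length : Int) = k := by simpa using hcond
      refine List.mem_map.mpr ⟨((j.length : Int), pvFmt j), ?_, hlen⟩
      refine List.mem_map.mpr ⟨j, ?_, rfl⟩
      refine List.mem_filter.mpr ⟨hjm, ?_⟩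
      simp only [Bool.and_eq_true, decide_eq_true_eq]
      omega
  have hBnodup : groups.keys.Nodup := by
    rw [hBkeys]; exact PySem.Set.nodup_ofList _
  have hperm : cache.keys.Perm groups.keys :=
    (List.perm_ext_iff_of_nodup hnodC hBnodup).mpr (fun k => by rw [hCmem k, hBmem k])
  have hsorted : PySem.List.sorted cache.keys (fun x => x) = PySem.List.sorted groups.keys (fun x => x) :=
    PySem.List.sorted_eq_sorted_of_perm cache.keys groups.keys (fun x => x) (fun a b h => h) hperm
  rw [pv_foldl_append (fun k => cache2.getD k ""), List.nil_append, hkeys2, hsorted]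
  congr 1
  refine List.map_congr_left (fun k hk => ?_)
  have hkmem : k ∈ groups.keys := (PySem.List.mem_sorted _ _ _ _).mp hk
  have hkC : k ∈ cache.keys := (hCmem k).mpr ((hBmem k).mp hkmem)
  have hkR : k ∈ R := ((hBmem k).mp hkmem).1
  rw [hget2 k hkC, hBget k hkR]

-- ===== VERDICT (by name: the statement is the Claim_ definition above) =====
theorem output_spec : Claim_equal_output := by
  intro mi _ _
  unfold Spec_output
  exact pv_main mi
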